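-- pv_equiv track=rewrite | github.com/64bits/Little-Langtale | app/process.py | break_text_into_words
-- ===== SOURCE A (Python) =====
-- def break_text_into_words(segments):
--     """Break text segments into individual words/characters for better wrapping"""
--     words = []
--
--     for segment in segments:
--         if segment['type'] == 'text':
--             content = segment['content']
--             # Split on whitespace for English words, but keep Japanese characters separate
--             i = 0
--             current_word = ""
--
--             while i < len(content):
--                 char = content[i]
--
--                 # Handle newlines as explicit line breaks
--                 if char == '\n':
--                     # End current word if we have one
--                     if current_word:
--                         words.append({'type': 'text', 'content': current_word})
--                         current_word = ""
--                     # Add newline as line break marker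
--                     words.append({'type': 'line_break'})
--                 # Check if character is ASCII (likely English)
--                 elif ord(char) < 128:
--                     if char.isspace():
--                         # End current word if we have one
--                         if current_word:
--                             words.append({'type': 'text', 'content': current_word})
--                             current_word = ""
--                         # Add space as separate element
--                         words.append({'type': 'text', 'content': char})
--                     else:
--                         # Build English word
--                         current_word += char
--                 else:
--                     # End current English word if we have one
--                     if current_word:
--                         words.append({'type': 'text', 'content': current_word})
--                         current_word = ""
--                     # Add Japanese character individually for flexible wrapping
--                     words.append({'type': 'text', 'content': char})
--
--                 i += 1
--
--             # Add any remaining word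
--             if current_word:
--                 words.append({'type': 'text', 'content': current_word})
--         else:
--             # Keep furigana segments as-is
--             words.append(segment)
--
--     return words
-- ===== SOURCE B (Python) =====
-- def _is_word(ch):
--     return ord(ch) < 128 and not ch.isspace()
--
--
-- def _tokens(content):
--     # Two-pointer scan: maximal runs of word chars become one slice token,
--     # every other char is its own single-char token.
--     tokens = []
--     i = 0
--     n = len(content)
--     while i < n:
--         if _is_word(content[i]):
--             j = i
--             while j < n and _is_word(content[j]):
--                 j += 1
--             tokens.append(content[i:j])
--             i = j
--         else:
--             tokens.append(content[i])
--             i += 1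
--     return tokens
--
--
-- def break_text_into_words(segments):
--     words = []
--     for segment in segments:
--         if segment['type'] == 'text':
--             for tok in _tokens(segment['content']):
--                 if tok == '\n':
--                     words.append({'type': 'line_break'})
--                 else:
--                     words.append({'type': 'text', 'content': tok})
--         else:
--             words.append(segment)
--     return words
-- ===== Notes on version B (the rewrite author's own statement) =====
-- stated objective: alternative
-- what changed: Replaced A's single-pass state machine (current_word accumulator with per-char flush logic) by a two-phase tokenizer: a two-pointer scan slices content into maximal word runs and single separator chars, then a mapping phase turns each token into its dict.
-- outside the precondition, e.g. on break_text_into_words([{'type': 'text'}]): A raises KeyError, B raises KeyError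
import Mathlib
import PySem

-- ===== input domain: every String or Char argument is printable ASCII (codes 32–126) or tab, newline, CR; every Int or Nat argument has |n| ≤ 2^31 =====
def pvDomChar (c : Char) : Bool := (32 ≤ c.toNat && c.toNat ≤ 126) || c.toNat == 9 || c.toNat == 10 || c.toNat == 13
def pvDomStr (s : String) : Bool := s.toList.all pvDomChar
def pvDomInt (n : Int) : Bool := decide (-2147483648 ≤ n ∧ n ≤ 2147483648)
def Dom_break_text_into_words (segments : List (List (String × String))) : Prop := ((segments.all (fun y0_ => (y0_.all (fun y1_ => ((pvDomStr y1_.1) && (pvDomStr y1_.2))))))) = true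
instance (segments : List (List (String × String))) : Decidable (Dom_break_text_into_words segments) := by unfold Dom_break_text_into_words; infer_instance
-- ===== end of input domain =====

-- B replaces A's char-by-char state machine (accumulating current_word) with a two-phase
-- tokenizer: slice out maximal word runs / single separator chars, then map tokens to dicts.

-- ===== PORT A =====
-- emit {'type':'text','content':cur} if current_word is nonempty
def pvFlushA (cur : List Char) : List (List (String × String)) :=
  if cur ≠ [] then [[("type", "text"), ("content", String.ofList cur)]] else []

-- A's while-loop over content, state = current_word (tokens are emitted in order)
def pvLoopA : List Char → List Char → List (List (String × String))
  | [], cur => pvFlushA cur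
  | c :: cs, cur =>
    if c = '\n' then
      pvFlushA cur ++ [[("type", "line_break")]] ++ pvLoopA cs []
    else if c.toNat < 128 then
      if PySem.Chars.isspace c then
        pvFlushA cur ++ [[("type", "text"), ("content", String.ofList [c])]] ++ pvLoopA cs []
      else
        pvLoopA cs (cur ++ [c])
    else
      pvFlushA cur ++ [[("type", "text"), ("content", String.ofList [c])]] ++ pvLoopA cs []

def break_text_into_words (segments : List (List (String × String))) : List (List (String × String)) :=
  segments.foldl
    (fun words seg =>
      if (List.lookup "type" seg).getD "" = "text" then
        words ++ pvLoopA ((List.lookup "content" seg).getD "").toList []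
      else
        words ++ [seg])
    []

-- ===== PORT B =====
def pvIsWord (c : Char) : Bool := c.toNat < 128 && !(PySem.Chars.isspace c)

-- Source B's _tokens: maximal word runs as one token, other chars singly
def pvToks : List Char → List (List Char)
  | [] => []
  | c :: cs =>
    if pvIsWord c then
      (c :: cs.takeWhile pvIsWord) :: pvToks (cs.dropWhile pvIsWord)
    else
      [c] :: pvToks cs
termination_by cs => cs.length
decreasing_by
  · exact Nat.lt_succ_of_le (List.length_dropWhile_le pvIsWord cs)
  · simp

def pvRender (t : List Char) : List (String × String) :=
  if t = ['\n'] then [("type", "line_break")] else [("type", "text"), ("content", String.ofList t)]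

def break_text_into_words_alt (segments : List (List (String × String))) : List (List (String × String)) :=
  segments.foldl
    (fun words seg =>
      if (List.lookup "type" seg).getD "" = "text" then
        words ++ (pvToks ((List.lookup "content" seg).getD "").toList).map pvRender
      else
        words ++ [seg])
    []

-- ===== PRECONDITION & SPEC =====
-- Pre_ excludes exactly the inputs where Python A raises KeyError: a segment without a
-- 'type' key, or a 'text' segment without a 'content' key.
def Pre_break_text_into_words (segments : List (List (String × String))) : Prop :=
  ∀ seg ∈ segments, (List.lookup "type" seg).isSome ∧
    (List.lookup "type" seg = some "text" → (List.lookup "content" seg).isSome)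
instance (segments : List (List (String × String))) : Decidable (Pre_break_text_into_words segments) := by
  unfold Pre_break_text_into_words; infer_instance

def pvWitness_break_text_into_words : (List (List (String × String))) :=
  [[("type", "text"), ("content", "ab \ncd")], [("type", "furigana"), ("base", "x")]]

def Spec_break_text_into_words (segments : List (List (String × String))) (out : List (List (String × String))) : Prop := out = break_text_into_words_alt segments
instance (segments : List (List (String × String))) (out : List (List (String × String))) : Decidable (Spec_break_text_into_words segments out) := by unfold Spec_break_text_into_words; infer_instance

-- ===== CLAIM (what is proved, stated in full; the proofs are below) =====
def Claim_equal_break_text_into_words : Prop := ∀ (segments : List (List (String × String))), Dom_break_text_into_words segments → Pre_break_text_into_words segments → Spec_break_text_into_words segments (break_text_into_words segments)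

-- ===== LEMMAS AND PROOFS =====

-- flushing a nonempty word run renders it as a text token
lemma flush_word_run (c : Char) (tw : List Char) (hc : pvIsWord c = true) :
    pvFlushA (c :: tw) = [pvRender (c :: tw)] := by
  have hne : c ≠ '\n' := by
    intro h; subst h; simp [pvIsWord, PySem.Chars.isspace] at hc
  simp [pvFlushA, pvRender]
  intro h
  exact absurd h hne

-- splitting off the leading word run commutes with rendering
lemma toks_split (cs : List Char) :
    pvFlushA (cs.takeWhile pvIsWord) ++ (pvToks (cs.dropWhile pvIsWord)).map pvRender
      = (pvToks cs).map pvRender := by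
  cases cs with
  | nil => simp [pvFlushA, pvToks]
  | cons c cs' =>
    by_cases hc : pvIsWord c = true
    · rw [List.takeWhile_cons_of_pos hc, List.dropWhile_cons_of_pos hc,
        flush_word_run c _ hc]
      simp [pvToks, hc]
    · simp only [Bool.not_eq_true] at hc
      rw [List.takeWhile_cons_of_neg (by simp [hc]), List.dropWhile_cons_of_neg (by simp [hc])]
      simp [pvFlushA]

-- rendering of a single non-word, non-newline char
lemma render_single (c : Char) (hne : c ≠ '\n') :
    pvRender [c] = [("type", "text"), ("content", String.ofList [c])] := by
  simp [pvRender]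
  intro h
  exact absurd h hne

-- A's state machine equals flush-of-pending-run plus B's tokens of the rest
lemma loopA_eq (cs : List Char) : ∀ w, (∀ c ∈ w, pvIsWord c = true) →
    pvLoopA cs w
      = pvFlushA (w ++ cs.takeWhile pvIsWord) ++ (pvToks (cs.dropWhile pvIsWord)).map pvRender := by
  induction cs with
  | nil => intro w _; simp [pvLoopA, pvToks]
  | cons c cs' ih =>
    intro w hw
    by_cases hc : pvIsWord c = true
    · have h128 : c.toNat < 128 := by
        have := hc; simp [pvIsWord] at this; exact this.1
      have hsp : PySem.Chars.isspace c = false := by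
        have := hc; simp [pvIsWord] at this; exact this.2
      have hne : c ≠ '\n' := by
        intro h; subst h; simp [PySem.Chars.isspace] at hsp
      rw [List.takeWhile_cons_of_pos hc, List.dropWhile_cons_of_pos hc]
      have step : pvLoopA (c :: cs') w = pvLoopA cs' (w ++ [c]) := by
        simp [pvLoopA, hne, h128, hsp]
      rw [step, ih (w ++ [c]) (by
        intro x hx
        rcases List.mem_append.mp hx with h | h
        · exact hw x h
        · simp at h; subst h; exact hc)]
      simp
    · simp only [Bool.not_eq_true] at hc
      rw [List.takeWhile_cons_of_neg (by simp [hc]), List.dropWhile_cons_of_neg (by simp [hc])]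
      have tail : pvLoopA cs' [] = (pvToks cs').map pvRender := by
        rw [ih [] (by simp)]; simpa using toks_split cs'
      by_cases hnl : c = '\n'
      · subst hnl
        simp [pvLoopA, pvToks, hc, pvRender, tail]
      · have step : pvLoopA (c :: cs') w
            = pvFlushA w ++ [[("type", "text"), ("content", String.ofList [c])]] ++ pvLoopA cs' [] := by
          by_cases h128 : c.toNat < 128
          · have hsp : PySem.Chars.isspace c = true := by
              by_contra h
              simp only [Bool.not_eq_true] at h
              simp [pvIsWord, h128, h] at hc
            simp [pvLoopA, hnl, h128, hsp]
          · simp [pvLoopA, hnl, h128]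
        rw [step, tail]
        simp [pvToks, hc, render_single c hnl]

-- ===== VERDICT (by name: the statement is the Claim_ definition above) =====
theorem break_text_into_words_spec : Claim_equal_break_text_into_words := by
  intro segments _ _
  unfold Spec_break_text_into_words break_text_into_words break_text_into_words_alt
  congr 1
  funext words seg
  by_cases h : (List.lookup "type" seg).getD "" = "text"
  · simp only [h, if_true]
    congr 1
    rw [loopA_eq _ [] (by simp)]
    simpa using toks_split ((List.lookup "content" seg).getD "").toList
  · simp [h]
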